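-- pv_equiv track=rewrite | github.com/jerry3413/prd-to-i18n-skill | scripts/normalize_snapshot.py | detect_locale_from_tokens
-- ===== SOURCE A (Python) =====
-- SINGLE_TOKEN_LOCALES = {
--     "en": "en",
--     "english": "en",
--     "de": "de",
--     "german": "de",
--     "fr": "fr",
--     "french": "fr",
--     "it": "it",
--     "italian": "it",
--     "es": "es",
--     "spanish": "es",
--     "ru": "ru",
--     "russian": "ru",
--     "ko": "ko",
--     "korean": "ko",
--     "hi": "hi",
--     "hindi": "hi",
-- }
--
-- def detect_locale_from_tokens(tokens: list[str], default: str = "") -> str: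
--     for left, right, locale in (
--         ("zh", "hans", "zh-Hans"),
--         ("zh", "cn", "zh-Hans"),
--         ("zh", "chs", "zh-Hans"),
--         ("zh", "hant", "zh-Hant"),
--         ("zh", "tw", "zh-Hant"),
--         ("zh", "cht", "zh-Hant"),
--         ("pt", "br", "pt-BR"),
--     ):
--         for index in range(len(tokens) - 1):
--             if tokens[index] == left and tokens[index + 1] == right:
--                 return locale
--     for token in tokens:
--         locale = SINGLE_TOKEN_LOCALES.get(token)
--         if locale:
--             return locale
--     return default
-- ===== SOURCE B (Python) =====
-- SINGLE_TOKEN_LOCALES = {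
--     "en": "en",
--     "english": "en",
--     "de": "de",
--     "german": "de",
--     "fr": "fr",
--     "french": "fr",
--     "it": "it",
--     "italian": "it",
--     "es": "es",
--     "spanish": "es",
--     "ru": "ru",
--     "russian": "ru",
--     "ko": "ko",
--     "korean": "ko",
--     "hi": "hi",
--     "hindi": "hi",
-- }
--
-- # Each locale rule as (pair -> priority rank); the locale for rank r sits in PAIR_LOCALES[r].
-- PAIR_RANK = {
--     ("zh", "hans"): 0,
--     ("zh", "cn"): 1,
--     ("zh", "chs"): 2,
--     ("zh", "hant"): 3,
--     ("zh", "tw"): 4,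
--     ("zh", "cht"): 5,
--     ("pt", "br"): 6,
-- }
-- PAIR_LOCALES = ["zh-Hans", "zh-Hans", "zh-Hans", "zh-Hant", "zh-Hant", "zh-Hant", "pt-BR"]
--
-- def detect_locale_from_tokens(tokens: list[str], default: str = "") -> str:
--     # Single pass over the adjacent pairs, minimising the priority rank of the
--     # rules seen; the rule with the smallest rank wins, which is exactly the
--     # rule-priority order, regardless of where in the list each pair occurs.
--     best = 7
--     for pair in zip(tokens, tokens[1:]):
--         r = PAIR_RANK.get(pair, 7)
--         if r < best:
--             best = r
--     if best < 7:
--         return PAIR_LOCALES[best]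
--     for token in tokens:
--         locale = SINGLE_TOKEN_LOCALES.get(token)
--         if locale:
--             return locale
--     return default
-- ===== Notes on version B (the rewrite author's own statement) =====
-- stated objective: alternative
-- what changed: B inverts the traversal: instead of A's seven full scans of the token list in rule-priority order, B makes one pass over the adjacent token pairs, mapping each pair to a priority rank through a rank table and keeping the minimum rank, then returns the locale of that rank (min-rank reduction = first rule in priority order that matches anywhere).
import Mathlib
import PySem

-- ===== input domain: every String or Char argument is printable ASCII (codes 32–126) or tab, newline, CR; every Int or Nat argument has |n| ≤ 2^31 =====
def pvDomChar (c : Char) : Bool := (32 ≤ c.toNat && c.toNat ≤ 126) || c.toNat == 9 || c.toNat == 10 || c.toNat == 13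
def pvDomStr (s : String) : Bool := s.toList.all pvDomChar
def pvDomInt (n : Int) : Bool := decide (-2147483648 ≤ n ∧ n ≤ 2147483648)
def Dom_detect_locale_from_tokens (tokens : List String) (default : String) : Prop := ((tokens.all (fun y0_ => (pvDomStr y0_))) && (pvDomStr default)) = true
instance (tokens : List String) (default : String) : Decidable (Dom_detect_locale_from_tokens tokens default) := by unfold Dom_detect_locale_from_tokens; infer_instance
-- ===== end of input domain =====

-- B inverts the traversal: one pass over the adjacent token pairs keeping the minimum
-- priority rank from a rank table, instead of A's seven rule-ordered scans (objective: alternative).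

-- shared data constant (identical module-level dict in both Python files)
def pvSingleTokenLocales : PySem.Dict String String :=
  PySem.Dict.ofList
    [("en", "en"), ("english", "en"), ("de", "de"), ("german", "de"),
     ("fr", "fr"), ("french", "fr"), ("it", "it"), ("italian", "it"),
     ("es", "es"), ("spanish", "es"), ("ru", "ru"), ("russian", "ru"),
     ("ko", "ko"), ("korean", "ko"), ("hi", "hi"), ("hindi", "hi")]

-- ===== PORT A =====
-- A's rule tuple, in source order
def pvPairPriority : List (String × String × String) :=
  [("zh", "hans", "zh-Hans"), ("zh", "cn", "zh-Hans"), ("zh", "chs", "zh-Hans"),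
   ("zh", "hant", "zh-Hant"), ("zh", "tw", "zh-Hant"), ("zh", "cht", "zh-Hant"),
   ("pt", "br", "pt-BR")]

-- A's inner loop: 'for index in range(len(tokens) - 1): if tokens[index] == left and tokens[index+1] == right: return locale'
-- (indices are always in range, so getD is exact here)
def pvAScan (tokens : List String) (left right : String) : Bool :=
  (List.range (tokens.length - 1)).any
    (fun i => tokens.getD i "" == left && tokens.getD (i + 1) "" == right)

-- A's second loop: first token whose SINGLE_TOKEN_LOCALES value is truthy (values are non-empty strings)
def pvASingle (tokens : List String) : Option String :=
  tokens.findSome? (fun t =>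
    match PySem.Dict.get? pvSingleTokenLocales t with
    | some loc => if loc ≠ "" then some loc else none
    | none => none)

def detect_locale_from_tokens (tokens : List String) (default : String) : String :=
  match pvPairPriority.find? (fun p => pvAScan tokens p.1 p.2.1) with
  | some p => p.2.2
  | none => (pvASingle tokens).getD default

-- ===== PORT B =====
-- B's rank table PAIR_RANK and locale table PAIR_LOCALES
def pvRankDict : PySem.Dict (String × String) Nat :=
  PySem.Dict.ofList
    [(("zh", "hans"), 0), (("zh", "cn"), 1), (("zh", "chs"), 2),
     (("zh", "hant"), 3), (("zh", "tw"), 4), (("zh", "cht"), 5), (("pt", "br"), 6)]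

def pvPairLocales : List String :=
  ["zh-Hans", "zh-Hans", "zh-Hans", "zh-Hant", "zh-Hant", "zh-Hant", "pt-BR"]

-- B's second loop, as explicit recursion over the token list
def pvBSingle (tokens : List String) (default : String) : String :=
  match tokens with
  | [] => default
  | t :: rest =>
    match PySem.Dict.get? pvSingleTokenLocales t with
    | some loc => if loc ≠ "" then loc else pvBSingle rest default
    | none => pvBSingle rest default

-- B: 'best = 7; for pair in zip(tokens, tokens[1:]): r = PAIR_RANK.get(pair, 7); if r < best: best = r'
-- then 'PAIR_LOCALES[best]' if best < 7 (index always in range, so getD is exact), else the fallback loop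
def detect_locale_from_tokens_alt (tokens : List String) (default : String) : String :=
  let best := (tokens.zip (PySem.List.slice tokens (some 1) none)).foldl
      (fun b p => let r := PySem.Dict.getD pvRankDict p 7; if r < b then r else b) 7
  if best < 7 then pvPairLocales.getD best "" else pvBSingle tokens default

-- ===== PRECONDITION & SPEC =====
def Spec_detect_locale_from_tokens (tokens : List String) (default : String) (out : String) : Prop := out = detect_locale_from_tokens_alt tokens default
instance (tokens : List String) (default : String) (out : String) : Decidable (Spec_detect_locale_from_tokens tokens default out) := by unfold Spec_detect_locale_from_tokens; infer_instance

-- ===== CLAIM (what is proved, stated in full; the proofs are below) =====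
def Claim_equal_detect_locale_from_tokens : Prop := ∀ (tokens : List String) (default : String), Dom_detect_locale_from_tokens tokens default → Spec_detect_locale_from_tokens tokens default (detect_locale_from_tokens tokens default)

-- ===== LEMMAS AND PROOFS =====

-- proof-side abbreviations
def pvRankOf (p : String × String) : Nat := PySem.Dict.getD pvRankDict p 7

def pvKeys : List (String × String) :=
  [("zh", "hans"), ("zh", "cn"), ("zh", "chs"), ("zh", "hant"), ("zh", "tw"), ("zh", "cht"), ("pt", "br")]

-- the rank table maps exactly pvKeys[r] to r, everything else to 7
theorem pvRank_char (p : String × String) :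
    pvRankOf p = 7 ∨ (pvRankOf p < 7 ∧ p = pvKeys.getD (pvRankOf p) ("", "")) := by
  unfold pvRankOf
  rw [PySem.Dict.getD_eq_get?_getD]
  rcases h : PySem.Dict.get? pvRankDict p with _ | r
  · left; rfl
  · right
    revert h
    simp only [pvRankDict, show PySem.Dict.ofList
      [(("zh","hans"),0),(("zh","cn"),1),(("zh","chs"),2),(("zh","hant"),3),(("zh","tw"),4),(("zh","cht"),5),(("pt","br"),6)]
      = PySem.Dict.mk
      [(("zh","hans"),0),(("zh","cn"),1),(("zh","chs"),2),(("zh","hant"),3),(("zh","tw"),4),(("zh","cht"),5),(("pt","br"),6)] from by decide]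
    simp only [PySem.Dict.get?_mk_cons]
    split_ifs with h0 h1 h2 h3 h4 h5 h6 <;> intro h <;> simp_all <;>
      first
        | (subst h; simp_all [pvKeys])
        | simp [PySem.Dict.get?] at h

theorem pvRank_key (r : Nat) (hr : r < 7) : pvRankOf (pvKeys.getD r ("", "")) = r := by
  interval_cases r <;> decide

-- the fold in B is bounded by its accumulator …
theorem pvFold_le_acc (l : List (String × String)) (acc : Nat) :
    l.foldl (fun b p => let r := PySem.Dict.getD pvRankDict p 7; if r < b then r else b) acc ≤ acc := by
  induction l generalizing acc with
  | nil => simp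
  | cons p rest ih =>
    simp only [List.foldl_cons]
    split_ifs with h
    · exact le_of_lt (lt_of_le_of_lt (ih _) h)
    · exact ih acc

-- … by every element's rank …
theorem pvFold_le_mem (l : List (String × String)) (acc : Nat) (p : String × String) (hp : p ∈ l) :
    l.foldl (fun b p => let r := PySem.Dict.getD pvRankDict p 7; if r < b then r else b) acc ≤ pvRankOf p := by
  induction l generalizing acc with
  | nil => cases hp
  | cons q rest ih =>
    simp only [List.foldl_cons]
    rcases List.mem_cons.mp hp with h | h
    · subst h
      split_ifs with hlt
      · exact pvFold_le_acc rest _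
      · exact le_trans (pvFold_le_acc rest acc) (not_lt.mp hlt)
    · split_ifs <;> exact ih _ h

-- … and is either the accumulator or an element's rank
theorem pvFold_achieved (l : List (String × String)) (acc : Nat) :
    l.foldl (fun b p => let r := PySem.Dict.getD pvRankDict p 7; if r < b then r else b) acc = acc
      ∨ ∃ p ∈ l, l.foldl (fun b p => let r := PySem.Dict.getD pvRankDict p 7; if r < b then r else b) acc = pvRankOf p := by
  induction l generalizing acc with
  | nil => left; rfl
  | cons q rest ih =>
    simp only [List.foldl_cons]
    split_ifs with hlt
    · rcases ih (pvRankOf q) with h | ⟨p, hp, h⟩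
      · right; exact ⟨q, List.mem_cons_self .., h⟩
      · right; exact ⟨p, List.mem_cons_of_mem _ hp, h⟩
    · rcases ih acc with h | ⟨p, hp, h⟩
      · left; exact h
      · right; exact ⟨p, List.mem_cons_of_mem _ hp, h⟩

-- A's scan for (l, r) says exactly: (l, r) is an adjacent pair of tokens
theorem pvAScan_iff (tokens : List String) (l r : String) :
    pvAScan tokens l r = true ↔ (l, r) ∈ tokens.zip tokens.tail := by
  unfold pvAScan
  simp only [List.any_eq_true, List.mem_range, beq_iff_eq, Bool.and_eq_true]
  have hlen : (tokens.zip tokens.tail).length = tokens.length - 1 := by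
    rw [List.length_zip, List.length_tail]; omega
  constructor
  · rintro ⟨i, hi, h1, h2⟩
    rw [List.mem_iff_getElem]
    refine ⟨i, by omega, ?_⟩
    have hi1 : i < tokens.length := by omega
    have hi2 : i + 1 < tokens.length := by omega
    rw [List.getD_eq_getElem tokens "" hi1] at h1
    rw [List.getD_eq_getElem tokens "" hi2] at h2
    rw [List.getElem_zip, List.getElem_tail]
    simp [h1, h2]
  · intro hmem
    rw [List.mem_iff_getElem] at hmem
    obtain ⟨i, hi, h⟩ := hmem
    have hi' : i < tokens.length - 1 := by omega
    have hi1 : i < tokens.length := by omega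
    have hi2 : i + 1 < tokens.length := by omega
    rw [List.getElem_zip, List.getElem_tail] at h
    refine ⟨i, hi', ?_, ?_⟩
    · rw [List.getD_eq_getElem tokens "" hi1]; exact congrArg Prod.fst h
    · rw [List.getD_eq_getElem tokens "" hi2]; exact congrArg Prod.snd h

-- the two second loops agree
theorem pvSingle_eq (tokens : List String) (default : String) :
    (pvASingle tokens).getD default = pvBSingle tokens default := by
  induction tokens with
  | nil => rfl
  | cons t rest ih =>
    unfold pvASingle pvBSingle
    rw [List.findSome?_cons]
    cases h : PySem.Dict.get? pvSingleTokenLocales t with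
    | none => simpa [pvASingle] using ih
    | some loc =>
      by_cases hloc : loc ≠ ""
      · simp [hloc]
      · simp [hloc]; simpa [pvASingle] using ih


theorem pvAScan_false (tokens : List String) (l r : String)
    (h : (l, r) ∉ tokens.zip tokens.tail) : pvAScan tokens l r = false := by
  cases hb : pvAScan tokens l r
  · rfl
  · exact absurd ((pvAScan_iff tokens l r).mp hb) h

-- ===== VERDICT (by name: the statement is the Claim_ definition above) =====
theorem detect_locale_from_tokens_spec : Claim_equal_detect_locale_from_tokens := by
  intro tokens default _
  unfold Spec_detect_locale_from_tokens detect_locale_from_tokens detect_locale_from_tokens_alt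
  rw [PySem.List.slice_from_one]
  set pairs := tokens.zip tokens.tail with hpairs
  set m := pairs.foldl (fun b p => let r := PySem.Dict.getD pvRankDict p 7; if r < b then r else b) 7 with hm
  by_cases hlt : m < 7
  · -- some pair achieves rank m, and no rule of smaller rank occurs
    rcases pvFold_achieved pairs 7 with h7 | ⟨p, hp, hval⟩
    · rw [← hm] at h7; omega
    rw [← hm] at hval
    rcases pvRank_char p with h | ⟨_, hkey⟩
    · rw [h] at hval; omega
    have hcm : pvKeys.getD m ("", "") ∈ pairs := by rw [hval, ← hkey]; exact hp
    have hcj : ∀ j, j < m → pvKeys.getD j ("", "") ∉ pairs := by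
      intro j hj hmem
      have := pvFold_le_mem pairs 7 _ hmem
      rw [← hm, pvRank_key j (by omega)] at this
      omega
    simp only [if_pos hlt]
    interval_cases m
    · -- m = 0
      have h0 : pvAScan tokens "zh" "hans" = true := (pvAScan_iff tokens "zh" "hans").mpr hcm
      simp [pvPairPriority, h0, pvPairLocales]
    · -- m = 1
      have h0 : pvAScan tokens "zh" "hans" = false := pvAScan_false tokens "zh" "hans" (hcj 0 (by norm_num))
      have h1 : pvAScan tokens "zh" "cn" = true := (pvAScan_iff tokens "zh" "cn").mpr hcm
      simp [pvPairPriority, List.find?, h0, h1, pvPairLocales]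
    · -- m = 2
      have h0 : pvAScan tokens "zh" "hans" = false := pvAScan_false tokens "zh" "hans" (hcj 0 (by norm_num))
      have h1 : pvAScan tokens "zh" "cn" = false := pvAScan_false tokens "zh" "cn" (hcj 1 (by norm_num))
      have h2 : pvAScan tokens "zh" "chs" = true := (pvAScan_iff tokens "zh" "chs").mpr hcm
      simp [pvPairPriority, List.find?, h0, h1, h2, pvPairLocales]
    · -- m = 3
      have h0 : pvAScan tokens "zh" "hans" = false := pvAScan_false tokens "zh" "hans" (hcj 0 (by norm_num))
      have h1 : pvAScan tokens "zh" "cn" = false := pvAScan_false tokens "zh" "cn" (hcj 1 (by norm_num))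
      have h2 : pvAScan tokens "zh" "chs" = false := pvAScan_false tokens "zh" "chs" (hcj 2 (by norm_num))
      have h3 : pvAScan tokens "zh" "hant" = true := (pvAScan_iff tokens "zh" "hant").mpr hcm
      simp [pvPairPriority, List.find?, h0, h1, h2, h3, pvPairLocales]
    · -- m = 4
      have h0 : pvAScan tokens "zh" "hans" = false := pvAScan_false tokens "zh" "hans" (hcj 0 (by norm_num))
      have h1 : pvAScan tokens "zh" "cn" = false := pvAScan_false tokens "zh" "cn" (hcj 1 (by norm_num))
      have h2 : pvAScan tokens "zh" "chs" = false := pvAScan_false tokens "zh" "chs" (hcj 2 (by norm_num))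
      have h3 : pvAScan tokens "zh" "hant" = false := pvAScan_false tokens "zh" "hant" (hcj 3 (by norm_num))
      have h4 : pvAScan tokens "zh" "tw" = true := (pvAScan_iff tokens "zh" "tw").mpr hcm
      simp [pvPairPriority, List.find?, h0, h1, h2, h3, h4, pvPairLocales]
    · -- m = 5
      have h0 : pvAScan tokens "zh" "hans" = false := pvAScan_false tokens "zh" "hans" (hcj 0 (by norm_num))
      have h1 : pvAScan tokens "zh" "cn" = false := pvAScan_false tokens "zh" "cn" (hcj 1 (by norm_num))
      have h2 : pvAScan tokens "zh" "chs" = false := pvAScan_false tokens "zh" "chs" (hcj 2 (by norm_num))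
      have h3 : pvAScan tokens "zh" "hant" = false := pvAScan_false tokens "zh" "hant" (hcj 3 (by norm_num))
      have h4 : pvAScan tokens "zh" "tw" = false := pvAScan_false tokens "zh" "tw" (hcj 4 (by norm_num))
      have h5 : pvAScan tokens "zh" "cht" = true := (pvAScan_iff tokens "zh" "cht").mpr hcm
      simp [pvPairPriority, List.find?, h0, h1, h2, h3, h4, h5, pvPairLocales]
    · -- m = 6
      have h0 : pvAScan tokens "zh" "hans" = false := pvAScan_false tokens "zh" "hans" (hcj 0 (by norm_num))
      have h1 : pvAScan tokens "zh" "cn" = false := pvAScan_false tokens "zh" "cn" (hcj 1 (by norm_num))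
      have h2 : pvAScan tokens "zh" "chs" = false := pvAScan_false tokens "zh" "chs" (hcj 2 (by norm_num))
      have h3 : pvAScan tokens "zh" "hant" = false := pvAScan_false tokens "zh" "hant" (hcj 3 (by norm_num))
      have h4 : pvAScan tokens "zh" "tw" = false := pvAScan_false tokens "zh" "tw" (hcj 4 (by norm_num))
      have h5 : pvAScan tokens "zh" "cht" = false := pvAScan_false tokens "zh" "cht" (hcj 5 (by norm_num))
      have h6 : pvAScan tokens "pt" "br" = true := (pvAScan_iff tokens "pt" "br").mpr hcm
      simp [pvPairPriority, List.find?, h0, h1, h2, h3, h4, h5, h6, pvPairLocales]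
  · -- no rule pair occurs at all: A falls through to the single-token loop, B too
    have hAll : ∀ q ∈ pvPairPriority, pvAScan tokens q.1 q.2.1 = false := by
      intro q hq
      cases hb : pvAScan tokens q.1 q.2.1
      · rfl
      · exfalso
        have hmem := (pvAScan_iff tokens q.1 q.2.1).mp hb
        have hr : pvRankOf (q.1, q.2.1) < 7 := by
          fin_cases hq <;> decide
        have := pvFold_le_mem pairs 7 _ hmem
        rw [← hm] at this
        omega
    rw [List.find?_eq_none.mpr (fun q hq => by simp [hAll q hq])]
    simp only [if_neg hlt]
    exact pvSingle_eq tokens default
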